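-- pv_equiv track=rewrite | github.com/Anonimize4/TeleBot | KrisBot.py | _expand_pattern
-- ===== SOURCE A (Python) =====
-- from typing import Dict, List, Any, Optional
-- import string
-- from itertools import product
--
-- def _expand_pattern(pattern: str, max_len: int = 2, charset: Optional[str] = None) -> List[str]:
--     """Expand a simple pattern with a single '*' wildcard into candidate usernames.
--
--     - pattern: e.g. 'foo*bar' or '@foo*'
--     - max_len: maximum length to substitute for '*' (small number by default)
--     - charset: characters to use for expansion (defaults to lowercase letters+digits)
--
--     Returns a list of username strings (without leading '@'). This function is intentionally
--     conservative: it limits expansions to avoid huge candidate sets.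
--     """
--     if charset is None:
--         charset = string.ascii_lowercase + string.digits
--
--     # strip leading @ if present
--     if pattern.startswith("@"):
--         pattern = pattern[1:]
--
--     if "*" not in pattern:
--         return [pattern]
--
--     parts = pattern.split("*")
--     if len(parts) != 2:
--         # only support single '*' for now
--         return []
--
--     prefix, suffix = parts
--     candidates: List[str] = []
--     # generate all combinations up to max_len
--     for L in range(1, max_len + 1):
--         for comb in product(charset, repeat=L):
--             mid = "".join(comb)
--             candidates.append(prefix + mid + suffix)
--     return candidates
-- ===== SOURCE B (Python) =====
-- from typing import List, Optional
-- import string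
--
--
-- def _expand_pattern(pattern: str, max_len: int = 2, charset: Optional[str] = None) -> List[str]:
--     if charset is None:
--         charset = string.ascii_lowercase + string.digits
--
--     if pattern.startswith("@"):
--         pattern = pattern[1:]
--
--     if "*" not in pattern:
--         return [pattern]
--
--     parts = pattern.split("*")
--     if len(parts) != 2:
--         return []
--
--     prefix, suffix = parts
--     n = len(charset)
--     # Non-empty strings over an n-letter alphabet, in length-then-lex order, are
--     # exactly the bijective base-n numerals of 1, 2, 3, ...  So enumerate a single
--     # integer counter and decode it, instead of nested per-length loops.
--     total = sum(n ** L for L in range(1, max_len + 1))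
--     out: List[str] = []
--     for i in range(1, total + 1):
--         mid: List[str] = []
--         k = i
--         while k > 0:
--             k, r = divmod(k - 1, n)
--             mid.append(charset[r])
--         out.append(prefix + "".join(reversed(mid)) + suffix)
--     return out
-- ===== Notes on version B (the rewrite author's own statement) =====
-- stated objective: alternative
-- what changed: Replaces the nested per-length itertools.product enumeration with a single integer counter 1..sum(n**L) whose bijective base-n decoding yields each mid-string, exploiting that length-then-lex order over an n-letter alphabet is exactly bijective base-n numeral order.
import Mathlib
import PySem

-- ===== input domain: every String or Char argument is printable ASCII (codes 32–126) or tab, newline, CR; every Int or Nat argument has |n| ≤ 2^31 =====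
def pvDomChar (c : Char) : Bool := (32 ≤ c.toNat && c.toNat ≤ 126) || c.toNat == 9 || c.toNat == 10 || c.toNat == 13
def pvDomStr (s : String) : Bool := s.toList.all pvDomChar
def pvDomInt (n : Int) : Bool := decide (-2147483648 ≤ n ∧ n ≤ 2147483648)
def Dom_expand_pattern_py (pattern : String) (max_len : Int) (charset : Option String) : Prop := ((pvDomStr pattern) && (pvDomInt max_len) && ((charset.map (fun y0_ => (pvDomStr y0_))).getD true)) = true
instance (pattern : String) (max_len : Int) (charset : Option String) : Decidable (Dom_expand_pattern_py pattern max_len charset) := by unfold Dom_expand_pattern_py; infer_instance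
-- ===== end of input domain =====

-- B replaces A's nested per-length itertools.product loops with a single integer counter
-- decoded as a bijective base-n numeral (same candidates, same order); objective: alternative.

-- ===== PORT A =====
-- itertools.product(charset, repeat=L), in CPython's order (leftmost position varies slowest)
def pyProduct (cs : List Char) : Nat → List (List Char)
  | 0 => [[]]
  | n+1 => cs.flatMap (fun c => (pyProduct cs n).map (fun t => c :: t))

def expand_pattern_py (pattern : String) (max_len : Int) (charset : Option String) : List String :=
  let cs := (charset.getD "abcdefghijklmnopqrstuvwxyz0123456789").toList
  let p0 := pattern.toList
  let p := if PySem.Chars.startswith p0 ['@'] then PySem.List.slice p0 (some 1) none else p0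
  if PySem.Chars.isIn ['*'] p = false then [String.ofList p]
  else
    match PySem.Chars.splitOn p ['*'] with
    | [pre, suf] =>
      (PySem.List.pyRange 1 (max_len + 1) 1).foldl
        (fun acc L =>
          (pyProduct cs L.toNat).foldl
            (fun acc2 comb => acc2 ++ [String.ofList (pre ++ comb ++ suf)]) acc)
        []
    | _ => []

-- ===== PORT B =====
-- the while loop 'while k > 0: k, r = divmod(k-1, n); mid.append(charset[r])';
-- charset[r] is ported as getD with a dummy default: r = (k-1) % len(charset) is
-- always in range when the loop runs (k > 0 forces charset nonempty), so getD is exact there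
def decMid (cs : List Char) : Nat → List Char → List Char
  | 0, acc => acc
  | (k+1), acc => decMid cs (k / cs.length) (acc ++ [cs.getD (k % cs.length) ' '])
  decreasing_by exact Nat.lt_succ_of_le (Nat.div_le_self _ _)

def expand_pattern_py_alt (pattern : String) (max_len : Int) (charset : Option String) : List String :=
  let cs := (charset.getD "abcdefghijklmnopqrstuvwxyz0123456789").toList
  let p0 := pattern.toList
  let p := if PySem.Chars.startswith p0 ['@'] then PySem.List.slice p0 (some 1) none else p0
  if PySem.Chars.isIn ['*'] p = false then [String.ofList p]
  else
    let parts := PySem.Chars.splitOn p ['*']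
    if parts.length ≠ 2 then []
    else
      let pre := parts.getD 0 []
      let suf := parts.getD 1 []
      let n := (cs.length : Int)
      let total := (PySem.List.pyRange 1 (max_len + 1) 1).foldl (fun s L => s + n ^ L.toNat) 0
      (PySem.List.pyRange 1 (total + 1) 1).foldl
        (fun acc i => acc ++ [String.ofList (pre ++ (decMid cs i.toNat []).reverse ++ suf)]) []

-- ===== PRECONDITION & SPEC =====
def Spec_expand_pattern_py (pattern : String) (max_len : Int) (charset : Option String) (out : List String) : Prop := out = expand_pattern_py_alt pattern max_len charset
instance (pattern : String) (max_len : Int) (charset : Option String) (out : List String) : Decidable (Spec_expand_pattern_py pattern max_len charset out) := by unfold Spec_expand_pattern_py; infer_instance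

-- ===== CLAIM (what is proved, stated in full; the proofs are below) =====
def Claim_equal_expand_pattern_py : Prop := ∀ (pattern : String) (max_len : Int) (charset : Option String), Dom_expand_pattern_py pattern max_len charset → Spec_expand_pattern_py pattern max_len charset (expand_pattern_py pattern max_len charset)

-- ===== LEMMAS AND PROOFS =====

-- T n m = n + n^2 + ... + n^m, the number of nonempty strings of length ≤ m over n letters
def pvT (n : Nat) : Nat → Nat
  | 0 => 0
  | m+1 => pvT n m + n ^ (m+1)

lemma pvT_succ' (n : Nat) : ∀ m, pvT n (m+1) = n * (1 + pvT n m) := by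
  intro m
  induction m with
  | zero => show 0 + n ^ 1 = n * (1 + 0); simp
  | succ m ih =>
    show pvT n (m+1) + n ^ (m+2) = n * (1 + pvT n (m+1))
    conv_rhs => rw [show pvT n (m+1) = pvT n m + n ^ (m+1) from rfl]
    rw [ih, pow_succ]
    ring

-- appending one character on the right of every mid of level n gives level n+1 (in the same order)
lemma pyProduct_back (cs : List Char) (n : Nat) :
    pyProduct cs (n+1) = (pyProduct cs n).flatMap (fun m => cs.map (fun c => m ++ [c])) := by
  induction n with
  | zero =>
    show cs.flatMap (fun c => (pyProduct cs 0).map (fun t => c :: t)) = _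
    induction cs with
    | nil => rfl
    | cons a t ih => simp_all [pyProduct]
  | succ n ih =>
    have h : ∀ c : Char, (pyProduct cs (n+1)).map (fun t => c :: t)
        = (pyProduct cs n).flatMap (fun t => cs.map (fun c' => c :: (t ++ [c']))) := by
      intro c
      rw [ih]
      simp [List.map_flatMap, List.map_map, Function.comp_def]
    show cs.flatMap (fun c => (pyProduct cs (n+1)).map (fun t => c :: t)) = _
    conv_rhs => rw [show pyProduct cs (n+1) = cs.flatMap (fun c => (pyProduct cs n).map (fun t => c :: t)) from rfl]
    simp only [h]
    simp [List.flatMap_assoc, List.flatMap_map]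

lemma pr1 (n : Int) : PySem.List.pyRange 1 (n+1) 1 = (List.range n.toNat).map (fun k : Nat => 1 + (k:Int)) := by
  simp only [PySem.List.pyRange, if_neg (by norm_num : ¬(1:Int)=0), if_pos (by norm_num : (0:Int)<1)]
  by_cases h : (1:Int) < n + 1
  · rw [if_pos h]
    have hX : ((n+1-1+1-1)/1).toNat = n.toNat := by omega
    rw [hX]; exact List.map_congr_left (fun a _ => by ring)
  · rw [if_neg h]
    have : n.toNat = 0 := by omega
    simp [this]

lemma decMid_acc (cs : List Char) : ∀ k acc, decMid cs k acc = acc ++ decMid cs k [] := by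
  intro k
  induction k using Nat.strong_induction_on with
  | _ k ih =>
    intro acc
    match k with
    | 0 => simp [decMid]
    | k+1 =>
      rw [decMid, decMid,
        ih (k / cs.length) (Nat.lt_succ_of_le (Nat.div_le_self _ _)) (acc ++ [cs.getD (k % cs.length) ' ']),
        ih (k / cs.length) (Nat.lt_succ_of_le (Nat.div_le_self _ _)) ([] ++ [cs.getD (k % cs.length) ' '])]
      simp

lemma decMid_rev (cs : List Char) (k : Nat) :
    (decMid cs (k+1) []).reverse
      = (decMid cs (k / cs.length) []).reverse ++ [cs.getD (k % cs.length) ' '] := by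
  rw [decMid, decMid_acc]
  simp

lemma map_getD_range {α : Type} (l : List α) (d : α) :
    (List.range l.length).map (fun j => l.getD j d) = l := by
  induction l with
  | nil => rfl
  | cons a t ih =>
    rw [List.length_cons, List.range_succ_eq_map, List.map_cons, List.map_map]
    simp only [Function.comp_def, List.getD_cons_zero, List.getD_cons_succ]
    rw [ih]

-- splitting range (M*n) by div/mod
lemma range_mul_flatMap {α : Type} (M n : Nat) (F : Nat → Nat → α) :
    (List.range (M * n)).map (fun j => F (j / n) (j % n))
      = (List.range M).flatMap (fun q => (List.range n).map (fun r => F q r)) := by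
  by_cases hn : n = 0
  · simp [hn]
  induction M with
  | zero => simp
  | succ M ih =>
    rw [Nat.succ_mul, List.range_add, List.range_succ, List.map_append, ih,
      List.flatMap_append, List.map_map]
    congr 1
    simp only [List.flatMap_cons, List.flatMap_nil, List.append_nil]
    apply List.map_congr_left
    intro r hr
    have hr' : r < n := List.mem_range.mp hr
    have h1 : (M * n + r) / n = M := by
      rw [Nat.mul_comm, Nat.mul_add_div (Nat.pos_of_ne_zero hn)]
      simp [Nat.div_eq_of_lt hr']
    have h2 : (M * n + r) % n = r := by
      rw [Nat.mul_comm, Nat.mul_add_mod]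
      exact Nat.mod_eq_of_lt hr'
    simp [h1, h2]

-- level m+1 of A's enumeration = decodes of the counters T m + 1 .. T m + n^(m+1)
lemma level_eq (cs : List Char) : ∀ m : Nat,
    pyProduct cs (m+1)
      = (List.range (cs.length ^ (m+1))).map
          (fun j => (decMid cs (pvT cs.length m + 1 + j) []).reverse) := by
  intro m
  by_cases hcs : cs = []
  · subst hcs
    induction m with
    | zero => rfl
    | succ m ih => rw [pyProduct_back, ih]; simp
  · induction m with
    | zero =>
      have h1 : pyProduct cs 1 = cs.map (fun c => [c]) := by
        have hgen : ∀ l : List Char, l.flatMap (fun c => [[c]]) = l.map (fun c => [c]) := by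
          intro l; induction l <;> simp_all
        exact hgen cs
      rw [h1]
      have : ∀ j ∈ List.range (cs.length ^ 1),
          (decMid cs (pvT cs.length 0 + 1 + j) []).reverse = [cs.getD j ' '] := by
        intro j hj
        have hj' : j < cs.length := by simpa using List.mem_range.mp hj
        rw [show pvT cs.length 0 + 1 + j = j + 1 by simp only [pvT]; omega]
        rw [decMid_rev, Nat.div_eq_of_lt hj', Nat.mod_eq_of_lt hj']
        simp [decMid]
      rw [List.map_congr_left this]
      conv_rhs => rw [show cs.length ^ 1 = cs.length by ring]
      rw [show (fun j => [cs.getD j ' ']) = (fun c : Char => [c]) ∘ (fun j => cs.getD j ' ') from rfl,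
        ← List.map_map, map_getD_range]
    | succ m ih =>
      have hn : 0 < cs.length := List.length_pos_of_ne_nil hcs
      rw [pyProduct_back, ih, List.flatMap_map]
      have hrw : ∀ j ∈ List.range (cs.length ^ (m+2)),
          (decMid cs (pvT cs.length (m+1) + 1 + j) []).reverse
            = (decMid cs (pvT cs.length m + 1 + j / cs.length) []).reverse
                ++ [cs.getD (j % cs.length) ' '] := by
        intro j _
        have hk : pvT cs.length (m+1) + 1 + j
            = (pvT cs.length (m+1) + j) + 1 := by omega
        have hT : pvT cs.length (m+1) + j = cs.length * (1 + pvT cs.length m) + j := by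
          rw [pvT_succ']
        have hd : (cs.length * (1 + pvT cs.length m) + j) / cs.length
            = pvT cs.length m + 1 + j / cs.length := by
          rw [Nat.mul_add_div hn]; omega
        have hm2 : (cs.length * (1 + pvT cs.length m) + j) % cs.length = j % cs.length := by
          rw [Nat.mul_add_mod]
        rw [hk, decMid_rev, hT, hd, hm2]
      rw [show cs.length ^ (m+2) = cs.length ^ (m+1) * cs.length from by ring] at hrw ⊢
      rw [List.map_congr_left hrw]
      rw [range_mul_flatMap (cs.length ^ (m+1)) cs.length
        (fun q r => (decMid cs (pvT cs.length m + 1 + q) []).reverse ++ [cs.getD r ' '])]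
      apply List.flatMap_congr
      intro q _
      rw [show (fun r : Nat => (decMid cs (pvT cs.length m + 1 + q) []).reverse ++ [cs.getD r ' '])
            = (fun c : Char => (decMid cs (pvT cs.length m + 1 + q) []).reverse ++ [c])
              ∘ (fun r : Nat => cs.getD r ' ') from rfl, ← List.map_map, map_getD_range]

-- all levels 1..m concatenated = decodes of counters 1..T m
lemma all_eq (cs : List Char) : ∀ m : Nat,
    (List.range m).flatMap (fun k => pyProduct cs (k+1))
      = (List.range (pvT cs.length m)).map (fun j => (decMid cs (j+1) []).reverse) := by
  intro m
  induction m with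
  | zero => rfl
  | succ m ih =>
    rw [List.range_succ, List.flatMap_append, ih]
    simp only [List.flatMap_cons, List.flatMap_nil, List.append_nil]
    rw [level_eq]
    conv_rhs => rw [show pvT cs.length (m+1) = pvT cs.length m + cs.length ^ (m+1) from rfl]
    rw [List.range_add, List.map_append, List.map_map]
    congr 1
    apply List.map_congr_left
    intro a _
    simp only [Function.comp_def]
    rw [show pvT cs.length m + 1 + a = pvT cs.length m + a + 1 by omega]

-- B's total accumulator computes pvT
lemma total_eq (cs : List Char) (ml : Int) :
    (PySem.List.pyRange 1 (ml + 1) 1).foldl (fun s L => s + (cs.length : Int) ^ L.toNat) 0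
      = (pvT cs.length ml.toNat : Int) := by
  rw [pr1, List.foldl_map]
  have h : ∀ k : Nat, ((1:Int) + (k:Int)).toNat = k + 1 := by intro k; omega
  generalize ml.toNat = m
  induction m with
  | zero => rfl
  | succ m ih =>
    rw [List.range_succ, List.foldl_append, ih]
    simp only [List.foldl_cons, List.foldl_nil, h]
    show _ = ((pvT cs.length m + cs.length ^ (m+1) : Nat) : Int)
    push_cast
    ring

-- A's nested loops and B's counter loop produce the same candidate list
lemma loops_eq (cs pre suf : List Char) (n : Int) :
    (PySem.List.pyRange 1 (n + 1) 1).foldl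
      (fun acc L =>
        (pyProduct cs L.toNat).foldl
          (fun acc2 comb => acc2 ++ [String.ofList (pre ++ comb ++ suf)]) acc)
      []
    = (PySem.List.pyRange 1
          ((PySem.List.pyRange 1 (n + 1) 1).foldl (fun s L => s + (cs.length : Int) ^ L.toNat) 0 + 1) 1).foldl
        (fun acc i => acc ++ [String.ofList (pre ++ (decMid cs i.toNat []).reverse ++ suf)]) [] := by
  rw [total_eq]
  simp only [PySem.List.foldl_append_singleton_eq_map]
  rw [PySem.List.foldl_append_eq_flatMap]
  simp only [List.nil_append]
  rw [pr1 n, pr1 (pvT cs.length n.toNat : Int), Int.toNat_natCast]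
  have h : ∀ k : Nat, ((1:Int) + (k:Int)).toNat = k + 1 := by intro k; omega
  rw [List.flatMap_map, List.map_map]
  simp only [Function.comp_def, h]
  rw [show (fun k : Nat => (pyProduct cs (k+1)).map
        (fun comb => String.ofList (pre ++ comb ++ suf)))
      = (fun k : Nat => (pyProduct cs (k+1)).map
        (fun comb => String.ofList (pre ++ comb ++ suf))) from rfl]
  rw [← List.map_flatMap, all_eq, List.map_map]
  rfl

-- ===== VERDICT (by name: the statement is the Claim_ definition above) =====
theorem expand_pattern_py_spec : Claim_equal_expand_pattern_py := by
  intro pattern max_len charset _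
  unfold Spec_expand_pattern_py expand_pattern_py expand_pattern_py_alt
  dsimp only
  by_cases h : PySem.Chars.isIn ['*']
      (if PySem.Chars.startswith pattern.toList ['@'] then PySem.List.slice pattern.toList (some 1) none else pattern.toList) = false
  · rw [if_pos h, if_pos h]
  · rw [if_neg h, if_neg h]
    cases hs : PySem.Chars.splitOn
        (if PySem.Chars.startswith pattern.toList ['@'] then PySem.List.slice pattern.toList (some 1) none else pattern.toList) ['*'] with
    | nil => rfl
    | cons pre t =>
      cases t with
      | nil => rfl
      | cons suf t2 =>
        cases t2 with
        | nil =>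
          rw [if_neg (by simp)]
          exact loops_eq _ pre suf max_len
        | cons c t3 =>
          rw [if_pos (by simp)]
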